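-- pv_equiv track=rewrite | github.com/amol-ship-it/agi-core | domains/arc/transformation_primitives.py | trim_rows
-- ===== SOURCE A (Python) =====
-- Grid = list[list[int]]
--
-- def trim_rows(grid: Grid) -> Grid:
--     """Remove leading and trailing all-zero rows."""
--     if not grid or not grid[0]:
--         return grid
--     h = len(grid)
--     top = 0
--     while top < h and all(c == 0 for c in grid[top]):
--         top += 1
--     bot = h - 1
--     while bot >= top and all(c == 0 for c in grid[bot]):
--         bot -= 1
--     if top > bot:
--         return grid
--     return [row[:] for row in grid[top:bot + 1]]
-- ===== SOURCE B (Python) =====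
-- def trim_rows(grid):
--     """Remove leading and trailing all-zero rows."""
--     if not grid or not grid[0]:
--         return grid
--     idx = [i for i, row in enumerate(grid) if any(c != 0 for c in row)]
--     if not idx:
--         return grid
--     return [row[:] for row in grid[idx[0]:idx[-1] + 1]]
-- ===== Notes on version B (the rewrite author's own statement) =====
-- stated objective: alternative
-- what changed: Replaces the two-ended while-loop boundary scan with a single pass collecting the indices of non-zero rows and slicing between the first and last of them.
import Mathlib
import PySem

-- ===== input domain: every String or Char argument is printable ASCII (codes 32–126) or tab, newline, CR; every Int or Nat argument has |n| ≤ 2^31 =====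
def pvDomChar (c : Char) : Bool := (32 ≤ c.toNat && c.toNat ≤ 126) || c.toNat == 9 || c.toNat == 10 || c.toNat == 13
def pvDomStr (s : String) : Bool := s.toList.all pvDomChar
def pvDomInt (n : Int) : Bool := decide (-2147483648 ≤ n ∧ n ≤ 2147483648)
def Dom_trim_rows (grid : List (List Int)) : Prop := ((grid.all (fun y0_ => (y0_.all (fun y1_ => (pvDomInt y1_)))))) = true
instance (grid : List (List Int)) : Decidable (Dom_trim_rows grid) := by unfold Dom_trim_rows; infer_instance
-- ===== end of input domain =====

-- B replaces A's two-ended while-loop boundary scan by one pass collecting the indices of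
-- non-zero rows and slicing between the first and last of them ("alternative" decomposition,
-- same asymptotic cost). Return-value equivalence only (both return fresh row copies on trim).

-- ===== PORT A =====
def allZero (row : List Int) : Bool := row.all (fun c => c == 0)

-- 'while top < h and all(c == 0 for c in grid[top]): top += 1'
def trimTop (g : List (List Int)) (top : Nat) : Nat :=
  if h : top < g.length then
    (if allZero (g.getD top []) then trimTop g (top + 1) else top)
  else top
termination_by g.length - top
decreasing_by omega

-- 'while bot >= top and all(c == 0 for c in grid[bot]): bot -= 1'
def trimBot (g : List (List Int)) (top bot : Int) : Int :=
  if h : top ≤ bot ∧ allZero (g.getD bot.toNat []) then trimBot g top (bot - 1) else bot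
termination_by (bot + 1 - top).toNat
decreasing_by omega

def trim_rows (grid : List (List Int)) : List (List Int) :=
  if grid = [] ∨ grid.headD [] = [] then grid
  else
    let top := trimTop grid 0
    let bot := trimBot grid (top : Int) ((grid.length : Int) - 1)
    if (top : Int) > bot then grid
    else (PySem.List.slice grid (some (top : Int)) (some (bot + 1))).map (fun row => row)

-- ===== PORT B =====
-- '[i for i, row in enumerate(grid) if any(c != 0 for c in row)]'
def nonzeroIdx (g : List (List Int)) (s : Int) : List Int :=
  ((PySem.List.enumerate g s).filter (fun p => p.2.any (fun c => c != 0))).map Prod.fst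

def trim_rows_alt (grid : List (List Int)) : List (List Int) :=
  if grid = [] ∨ grid.headD [] = [] then grid
  else
    match nonzeroIdx grid 0 with
    | [] => grid
    | i :: rest =>
      (PySem.List.slice grid (some i) (some (rest.getLastD i + 1))).map (fun row => row)

-- ===== PRECONDITION & SPEC =====
def Spec_trim_rows (grid : List (List Int)) (out : List (List Int)) : Prop := out = trim_rows_alt grid
instance (grid : List (List Int)) (out : List (List Int)) : Decidable (Spec_trim_rows grid out) := by unfold Spec_trim_rows; infer_instance

-- ===== CLAIM (what is proved, stated in full; the proofs are below) =====
def Claim_equal_trim_rows : Prop := ∀ (grid : List (List Int)), Dom_trim_rows grid → Spec_trim_rows grid (trim_rows grid)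

-- ===== LEMMAS AND PROOFS =====

-- predicate bridge: B's 'any(c != 0)' is the negation of A's 'all(c == 0)'
lemma any_ne_eq_not_allZero (r : List Int) :
    (r.any fun c => c != 0) = !allZero r := by
  simp only [allZero]
  exact Eq.symm List.not_all_eq_any_not

lemma nonzeroIdx_nil (s : Int) : nonzeroIdx [] s = [] := by
  simp [nonzeroIdx, PySem.List.enumerate]

lemma nonzeroIdx_cons (r : List Int) (gs : List (List Int)) (s : Int) :
    nonzeroIdx (r :: gs) s =
      if allZero r then nonzeroIdx gs (s + 1) else s :: nonzeroIdx gs (s + 1) := by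
  simp only [nonzeroIdx, PySem.List.enumerate_cons, List.filter_cons, any_ne_eq_not_allZero]
  by_cases h : allZero r <;> simp [h]

lemma nonzeroIdx_eq_nil_iff (g : List (List Int)) :
    ∀ s : Int, nonzeroIdx g s = [] ↔ g.all allZero = true := by
  induction g with
  | nil => intro s; simp [nonzeroIdx_nil]
  | cons r gs ih =>
    intro s
    rw [nonzeroIdx_cons]
    by_cases h : allZero r <;> simp [h, ih]

lemma nonzeroIdx_head (g : List (List Int)) :
    ∀ (s i : Int) (rest : List Int), nonzeroIdx g s = i :: rest →
      i = s + ((g.takeWhile allZero).length : Int) := by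
  induction g with
  | nil => intro s i rest h; simp [nonzeroIdx_nil] at h
  | cons r gs ih =>
    intro s i rest h
    rw [nonzeroIdx_cons] at h
    by_cases hz : allZero r
    · rw [if_pos hz] at h
      have := ih (s + 1) i rest h
      simp [hz]
      omega
    · rw [if_neg hz] at h
      injection h with h1 h2
      simp [hz, ← h1]

lemma nonzeroIdx_last (g : List (List Int)) :
    ∀ (s i : Int) (rest : List Int), nonzeroIdx g s = i :: rest →
      (i :: rest).getLastD 0 = s + (g.length : Int) - 1 - ((g.reverse.takeWhile allZero).length : Int) := by
  induction g with
  | nil => intro s i rest h; simp [nonzeroIdx_nil] at h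
  | cons r gs ih =>
    intro s i rest h
    rw [nonzeroIdx_cons] at h
    cases hgs : nonzeroIdx gs (s + 1) with
    | nil =>
      have hall : gs.all allZero = true := (nonzeroIdx_eq_nil_iff gs (s + 1)).1 hgs
      by_cases hz : allZero r
      · rw [if_pos hz, hgs] at h; cases h
      · rw [if_neg hz, hgs] at h
        injection h with h1 h2
        subst h1; subst h2
        have htw : (gs.reverse ++ [r]).takeWhile allZero = gs.reverse := by
          rw [List.takeWhile_append]
          have he : gs.reverse.takeWhile allZero = gs.reverse :=
            List.takeWhile_eq_self_iff.2
              (fun x hx => (List.all_eq_true.1 hall) x (List.mem_reverse.1 hx))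
          simp [he, hz]
        have hl : ([s] : List Int).getLastD 0 = s := by simp
        rw [List.reverse_cons, htw, hl]
        simp only [List.length_cons, List.length_reverse]
        push_cast; ring
    | cons j rest' =>
      have hne : ¬ gs.all allZero = true := by
        intro hall
        rw [(nonzeroIdx_eq_nil_iff gs (s + 1)).2 hall] at hgs; exact absurd hgs (by simp)
      have htw : (gs.reverse ++ [r]).takeWhile allZero = gs.reverse.takeWhile allZero := by
        rw [List.takeWhile_append]
        have hlt : (gs.reverse.takeWhile allZero).length ≠ gs.reverse.length := by
          intro he
          have hpre := (List.takeWhile_prefix (p := allZero) (l := gs.reverse)).eq_of_length he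
          apply hne
          refine List.all_eq_true.2 (fun x hx => ?_)
          have hx' : x ∈ gs.reverse.takeWhile allZero := by
            rw [hpre]; exact List.mem_reverse.2 hx
          exact List.mem_takeWhile_imp hx'
        rw [if_neg hlt]
      have ihj := ih (s + 1) j rest' hgs
      by_cases hz : allZero r
      · rw [if_pos hz, hgs] at h
        injection h with h1 h2
        subst h1; subst h2
        rw [List.reverse_cons, htw, ihj]
        simp only [List.length_cons]; push_cast; ring
      · rw [if_neg hz, hgs] at h
        injection h with h1 h2
        subst h1; subst h2
        have e1 : (s :: j :: rest').getLastD 0 = (j :: rest').getLastD 0 := by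
          simp
        rw [e1, ihj, List.reverse_cons, htw]
        simp only [List.length_cons]; push_cast; ring

lemma trimTop_spec (g : List (List Int)) (t : Nat) :
    trimTop g t = t + ((g.drop t).takeWhile allZero).length := by
  have H : ∀ n t, g.length - t ≤ n → trimTop g t = t + ((g.drop t).takeWhile allZero).length := by
    intro n
    induction n with
    | zero =>
      intro t ht
      rw [trimTop]
      have hge : g.length ≤ t := by omega
      rw [dif_neg (by omega)]
      rw [List.drop_of_length_le hge]
      simp
    | succ n ih =>
      intro t ht
      rw [trimTop]
      by_cases h : t < g.length
      · rw [dif_pos h]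
        have hdrop : g.drop t = g[t] :: g.drop (t + 1) := List.drop_eq_getElem_cons h
        have hgd : g.getD t [] = g[t] := List.getD_eq_getElem g [] h
        by_cases hz : allZero g[t]
        · rw [if_pos (hgd ▸ hz), ih (t + 1) (by omega)]
          rw [hdrop, List.takeWhile_cons, if_pos hz]
          simp; omega
        · rw [if_neg (hgd ▸ hz)]
          rw [hdrop, List.takeWhile_cons, if_neg hz]
          simp
      · rw [dif_neg h]
        rw [List.drop_of_length_le (by omega)]
        simp
  exact H (g.length - t) t le_rfl

lemma trimBot_spec (g : List (List Int)) (top : Int) :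
    ∀ b : Nat, 0 ≤ top → top ≤ (b : Int) + 1 → b < g.length →
      trimBot g top b = max (top - 1) ((b : Int) - (((g.take (b + 1)).reverse.takeWhile allZero).length : Int)) := by
  intro b
  induction b with
  | zero =>
    intro h0 h1 h2
    have hgd : g.getD 0 [] = g[0] := List.getD_eq_getElem g [] h2
    have htake : g.take 1 = [g[0]] := by
      rw [List.take_one]
      cases g with
      | nil => simp at h2
      | cons a l => simp
    rw [trimBot]
    push_cast
    by_cases hz : top ≤ 0 ∧ allZero (g.getD 0 []) = true
    · rw [dif_pos hz]
      rw [trimBot, dif_neg (by intro hc; exact absurd hc.1 (by omega))]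
      have : allZero g[0] = true := by
        have := hz.2; rwa [hgd] at this
      simp [htake, this]
      omega
    · rw [dif_neg hz]
      by_cases ht : top ≤ 0
      · have hz0 : ¬ allZero g[0] = true := by
          intro hc; exact hz ⟨ht, by rwa [hgd]⟩
        simp [htake, hz0]
        omega
      · have : (((g.take 1).reverse.takeWhile allZero).length : Int) ≤ 1 := by
          have := (List.takeWhile_prefix (l := (g.take 1).reverse) allZero).length_le
          simp [htake] at this ⊢; omega
        omega
  | succ b ih =>
    intro h0 h1 h2
    have hgd : g.getD (b + 1) [] = g[b + 1] := List.getD_eq_getElem g [] h2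
    have htake : g.take (b + 2) = g.take (b + 1) ++ [g[b + 1]] := by
      rw [List.take_add_one]
      simp [List.getElem?_eq_getElem h2]
    rw [trimBot]
    push_cast
    have hnat : (Int.toNat ((b : Int) + 1)) = b + 1 := by omega
    by_cases hz : top ≤ (b : Int) + 1 ∧ allZero (g.getD ((b : Int) + 1).toNat []) = true
    · rw [dif_pos hz]
      have hza : allZero g[b + 1] = true := by
        have := hz.2; rw [hnat, hgd] at this; exact this
      rw [show (b : Int) + 1 - 1 = (b : Int) by ring]
      rw [ih h0 (by omega) (by omega)]
      rw [htake, List.reverse_append]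
      simp only [List.reverse_cons, List.reverse_nil, List.nil_append, List.singleton_append,
        List.takeWhile_cons, hza, if_pos, List.length_cons]
      push_cast; omega
    · rw [dif_neg hz]
      by_cases ht : top ≤ (b : Int) + 1
      · have hz1 : ¬ allZero g[b + 1] = true := by
          intro hc; exact hz ⟨ht, by rw [hnat, hgd]; exact hc⟩
        rw [htake, List.reverse_append]
        simp only [List.reverse_cons, List.reverse_nil, List.nil_append, List.singleton_append,
          List.takeWhile_cons, hz1]
        simp
        omega
      · have := (List.takeWhile_prefix (l := (g.take (b + 2)).reverse) allZero).length_le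
        have hlen : ((g.take (b + 2)).reverse.length : Int) ≤ (b : Int) + 2 := by
          simp only [List.length_reverse, List.length_take]; omega
        have : (((g.take (b + 2)).reverse.takeWhile allZero).length : Int) ≤ (b : Int) + 2 := by
          omega
        omega

lemma not_allZero_getElem_takeWhile_length (l : List (List Int))
    (h : (l.takeWhile allZero).length < l.length) :
    allZero (l[(l.takeWhile allZero).length]'h) = false := by
  induction l with
  | nil => simp at h
  | cons x xs ih =>
    by_cases hz : allZero x
    · have : ((x :: xs).takeWhile allZero).length = (xs.takeWhile allZero).length + 1 := by
        simp [hz]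
      simp only [List.takeWhile_cons, hz, List.length_cons] at h ⊢
      have h' : (xs.takeWhile allZero).length < xs.length := by simpa using h
      simpa using ih h'
    · simp [hz] at h ⊢

lemma allZero_getElem_of_lt_takeWhile_length (l : List (List Int)) (j : Nat)
    (h : j < (l.takeWhile allZero).length) :
    allZero (l[j]'(lt_of_lt_of_le h ((List.takeWhile_prefix allZero).length_le))) = true := by
  have hpre : (l.takeWhile allZero) <+: l := List.takeWhile_prefix allZero
  have heq : (l.takeWhile allZero)[j]'h = l[j]'(lt_of_lt_of_le h ((List.takeWhile_prefix allZero).length_le)) :=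
    List.IsPrefix.getElem hpre h
  rw [← heq]
  exact List.mem_takeWhile_imp (List.getElem_mem h)

-- ===== VERDICT (by name: the statement is the Claim_ definition above) =====
theorem trim_rows_spec : Claim_equal_trim_rows := by
  intro g _
  unfold Spec_trim_rows trim_rows trim_rows_alt
  by_cases hg : g = [] ∨ g.headD [] = []
  · rw [if_pos hg, if_pos hg]
  · rw [if_neg hg, if_neg hg]
    have hgne : g ≠ [] := fun h => hg (Or.inl h)
    have hn1 : 1 ≤ g.length := List.length_pos_iff.2 hgne
    cases hidx : nonzeroIdx g 0 with
    | nil =>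
      dsimp only
      have hall : g.all allZero = true := (nonzeroIdx_eq_nil_iff g 0).1 hidx
      have htw : (g.takeWhile allZero) = g :=
        List.takeWhile_eq_self_iff.2 (fun x hx => List.all_eq_true.1 hall x hx)
      have htop : trimTop g 0 = g.length := by
        rw [trimTop_spec]; simp [htw]
      have hb : trimBot g ((trimTop g 0 : Nat) : Int) ((g.length : Int) - 1) = (g.length : Int) - 1 := by
        have hcast : ((g.length : Int) - 1) = ((g.length - 1 : Nat) : Int) := by omega
        rw [htop, hcast, trimBot_spec g _ (g.length - 1) (by omega) (by omega) (by omega)]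
        have : (((g.take (g.length - 1 + 1)).reverse.takeWhile allZero).length : Int) ≥ 0 := by positivity
        omega
      rw [hb, if_pos (by rw [htop]; omega)]
    | cons i rest =>
      dsimp only
      -- first index of a non-zero row is the takeWhile length
      have hi : i = ((g.takeWhile allZero).length : Int) := by
        have := nonzeroIdx_head g 0 i rest hidx; omega
      set tw := (g.takeWhile allZero).length with htwdef
      set twr := (g.reverse.takeWhile allZero).length with htwrdef
      have hlast : (i :: rest).getLastD 0 = (g.length : Int) - 1 - (twr : Int) := by
        have := nonzeroIdx_last g 0 i rest hidx; omega
      have htwlt : tw < g.length := by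
        by_contra hcon
        have he : tw = g.length := le_antisymm ((List.takeWhile_prefix allZero).length_le) (by omega)
        have := (List.takeWhile_prefix (l := g) (p := allZero)).eq_of_length he
        have hall : g.all allZero = true :=
          List.all_eq_true.2 (fun x hx => List.mem_takeWhile_imp (this ▸ hx))
        rw [(nonzeroIdx_eq_nil_iff g 0).2 hall] at hidx
        exact absurd hidx (by simp)
      have hnz : allZero (g[tw]'htwlt) = false := not_allZero_getElem_takeWhile_length g htwlt
      -- the non-zero row at index tw is not inside the all-zero suffix
      have hsum : tw + twr ≤ g.length - 1 := by
        by_contra hcon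
        have hj : g.length - 1 - tw < twr := by omega
        have hj' : g.length - 1 - tw < g.reverse.length := by simp; omega
        have hz := allZero_getElem_of_lt_takeWhile_length g.reverse (g.length - 1 - tw) (by omega)
        rw [List.getElem_reverse] at hz
        have heq : g.length - 1 - (g.length - 1 - tw) = tw := by omega
        simp only [heq] at hz
        rw [hnz] at hz
        exact absurd hz (by simp)
      have htop : trimTop g 0 = tw := by rw [trimTop_spec, List.drop_zero]; omega
      have hb : trimBot g ((trimTop g 0 : Nat) : Int) ((g.length : Int) - 1)
          = (g.length : Int) - 1 - (twr : Int) := by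
        have hcast : ((g.length : Int) - 1) = ((g.length - 1 : Nat) : Int) := by omega
        rw [htop, hcast, trimBot_spec g _ (g.length - 1) (by omega) (by omega) (by omega)]
        have htk : g.take (g.length - 1 + 1) = g := by
          rw [show g.length - 1 + 1 = g.length by omega]
          exact List.take_length
        rw [htk]
        omega
      rw [hb, htop]
      rw [if_neg (by omega)]
      have hbound1 : ((tw : Nat) : Int) = i := hi.symm
      have hbound2 : ((g.length : Int) - 1 - (twr : Int)) + 1 = rest.getLastD i + 1 := by
        have : (i :: rest).getLastD 0 = rest.getLastD i := List.getLastD_cons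
        omega
      rw [hbound1, hbound2]
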